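-- pv_equiv track=rewrite | github.com/PabloMessina/MedVQA | medvqa/datasets/mimiccxr/__init__.py | get_dicom_id_and_orientation_list
-- ===== SOURCE A (Python) =====
-- class MIMICCXR_ViewModes:
--     ALL = 'all'
--     FRONT_ALL = 'front_all'
--     FRONT_SINGLE = 'front_single'
--     ANY_SINGLE = 'any_single'
--     CHEST_IMAGENOME = 'chest_imagenome'
--
--     @staticmethod
--     def get_all_modes():
--         return [
--             MIMICCXR_ViewModes.ALL,
--             MIMICCXR_ViewModes.FRONT_ALL,
--             MIMICCXR_ViewModes.FRONT_SINGLE,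
--             MIMICCXR_ViewModes.ANY_SINGLE,
--             MIMICCXR_ViewModes.CHEST_IMAGENOME,
--         ]
--
-- def get_dicom_id_and_orientation_list(views, view_mode=MIMICCXR_ViewModes.ANY_SINGLE, chest_imagenome_dicom_ids=None):
--     output = []
--     if view_mode == MIMICCXR_ViewModes.ALL:
--         for view in views:
--             output.append((view[0], view[1]))
--     elif view_mode == MIMICCXR_ViewModes.FRONT_ALL:
--         for view in views:
--             if view[1] == 'PA' or view[1] == 'AP':
--                 output.append((view[0], view[1]))
--     elif view_mode == MIMICCXR_ViewModes.FRONT_SINGLE: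
--         dicom_id = None
--         for view in views:
--             if view[1] == 'PA':
--                 dicom_id = view[0]
--                 orientation = view[1]
--                 break
--         if dicom_id is None:
--             for view in views:
--                 if view[1] == 'AP':
--                     dicom_id = view[0]
--                     orientation = view[1]
--                     break
--         if dicom_id is not None:
--             output.append((dicom_id, orientation))
--     elif view_mode == MIMICCXR_ViewModes.ANY_SINGLE:
--         dicom_id = None
--         for view in views:
--             if view[1] == 'PA':
--                 dicom_id = view[0]
--                 orientation = view[1]
--                 break
--         if dicom_id is None:
--             for view in views:
--                 if view[1] == 'AP':
--                     dicom_id = view[0]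
--                     orientation = view[1]
--                     break
--         if dicom_id is None and len(views) > 0:
--             dicom_id = views[0][0]
--             orientation = views[0][1]
--         if dicom_id is not None:
--             output.append((dicom_id, orientation))
--     elif view_mode == MIMICCXR_ViewModes.CHEST_IMAGENOME:
--         assert chest_imagenome_dicom_ids is not None
--         for view in views:
--             if view[0] in chest_imagenome_dicom_ids:
--                 output.append((view[0], view[1]))
--     else:
--         raise ValueError('Unknown view mode: {}'.format(view_mode))
--     return output
-- ===== SOURCE B (Python) =====
-- def get_dicom_id_and_orientation_list(views, view_mode='any_single', chest_imagenome_dicom_ids=None):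
--     if view_mode == 'all':
--         return list(views)
--     if view_mode == 'front_all':
--         return [(d, o) for (d, o) in views if o == 'PA' or o == 'AP']
--     if view_mode == 'front_single' or view_mode == 'any_single':
--         # single pass: capture the first PA view and the first AP view
--         pa = ap = None
--         for v in views:
--             if v[1] == 'PA' and pa is None:
--                 pa = v
--             elif v[1] == 'AP' and ap is None:
--                 ap = v
--         cand = pa if pa is not None else ap
--         if cand is None and view_mode == 'any_single' and len(views) > 0:
--             cand = views[0]
--         return [] if cand is None else [(cand[0], cand[1])]
--     if view_mode == 'chest_imagenome':
--         assert chest_imagenome_dicom_ids is not None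
--         ids = set(chest_imagenome_dicom_ids)
--         return [(d, o) for (d, o) in views if d in ids]
--     raise ValueError('Unknown view mode: {}'.format(view_mode))
-- ===== Notes on version B (the rewrite author's own statement) =====
-- stated objective: alternative
-- what changed: FRONT_SINGLE/ANY_SINGLE are computed in one pass that captures the first PA and first AP candidates instead of two sequential breaking loops, and the ALL/FRONT_ALL/CHEST_IMAGENOME branches become direct copies/comprehensions (with a set for the id membership test).
import Mathlib
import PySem

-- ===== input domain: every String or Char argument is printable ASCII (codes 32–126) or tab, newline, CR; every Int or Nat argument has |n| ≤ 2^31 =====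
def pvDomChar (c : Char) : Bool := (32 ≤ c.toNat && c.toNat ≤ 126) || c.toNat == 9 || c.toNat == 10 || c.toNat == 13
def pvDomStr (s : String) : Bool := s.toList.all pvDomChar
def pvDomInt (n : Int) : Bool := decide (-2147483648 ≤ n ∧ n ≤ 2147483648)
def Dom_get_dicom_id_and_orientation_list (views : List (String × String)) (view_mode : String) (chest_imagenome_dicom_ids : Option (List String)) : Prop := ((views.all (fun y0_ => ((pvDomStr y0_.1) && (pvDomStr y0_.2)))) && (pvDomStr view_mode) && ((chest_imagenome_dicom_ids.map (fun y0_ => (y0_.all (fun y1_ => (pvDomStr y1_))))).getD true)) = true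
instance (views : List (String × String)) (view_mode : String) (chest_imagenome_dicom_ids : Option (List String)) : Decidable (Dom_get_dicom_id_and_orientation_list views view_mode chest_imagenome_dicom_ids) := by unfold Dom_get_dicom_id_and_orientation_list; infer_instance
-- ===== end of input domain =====

-- B computes FRONT_SINGLE/ANY_SINGLE in one pass capturing the first PA and first AP candidates
-- (instead of A's two sequential breaking loops); other branches become direct filters. Objective: alternative.


-- ===== PORT A =====
-- A's 'for view in views: if view[1] == ori: … break' loop: first view with the given orientation
def pvA_firstWith (ori : String) : List (String × String) → Option (String × String)
  | [] => none
  | v :: rest => if v.2 == ori then some v else pvA_firstWith ori rest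

def get_dicom_id_and_orientation_list (views : List (String × String)) (view_mode : String) (chest_imagenome_dicom_ids : Option (List String)) : List (String × String) :=
  if view_mode == "all" then
    views.foldl (fun acc v => acc ++ [(v.1, v.2)]) []
  else if view_mode == "front_all" then
    views.foldl (fun acc v => if v.2 == "PA" || v.2 == "AP" then acc ++ [(v.1, v.2)] else acc) []
  else if view_mode == "front_single" then
    match pvA_firstWith "PA" views with
    | some v => [(v.1, v.2)]
    | none =>
      match pvA_firstWith "AP" views with
      | some v => [(v.1, v.2)]
      | none => []
  else if view_mode == "any_single" then
    match pvA_firstWith "PA" views with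
    | some v => [(v.1, v.2)]
    | none =>
      match pvA_firstWith "AP" views with
      | some v => [(v.1, v.2)]
      | none =>
        match views with
        | v :: _ => [(v.1, v.2)]
        | [] => []
  else if view_mode == "chest_imagenome" then
    match chest_imagenome_dicom_ids with
    | some ids => views.foldl (fun acc v => if ids.contains v.1 then acc ++ [(v.1, v.2)] else acc) []
    | none => []  -- AssertionError in Python: excluded by Pre_
  else []  -- ValueError in Python: excluded by Pre_

-- ===== PORT B =====
-- B's single pass: fold keeping (first PA seen, first AP seen)
def pvB_step (acc : Option (String × String) × Option (String × String)) (v : String × String) : Option (String × String) × Option (String × String) :=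
  if v.2 == "PA" && acc.1.isNone then (some v, acc.2)
  else if v.2 == "AP" && acc.2.isNone then (acc.1, some v)
  else acc

def pvB_scan (views : List (String × String)) : Option (String × String) × Option (String × String) :=
  views.foldl pvB_step (none, none)

def get_dicom_id_and_orientation_list_alt (views : List (String × String)) (view_mode : String) (chest_imagenome_dicom_ids : Option (List String)) : List (String × String) :=
  if view_mode == "all" then views
  else if view_mode == "front_all" then
    views.filter (fun v => v.2 == "PA" || v.2 == "AP")
  else if view_mode == "front_single" || view_mode == "any_single" then
    let s := pvB_scan views
    let cand := if s.1.isSome then s.1 else s.2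
    let cand := if cand.isNone && view_mode == "any_single" then views.head? else cand
    match cand with
    | some v => [(v.1, v.2)]
    | none => []
  else if view_mode == "chest_imagenome" then
    match chest_imagenome_dicom_ids with
    | some ids =>
      let s := PySem.Set.ofList ids
      views.filter (fun v => PySem.Set.contains s v.1)
    | none => []
  else []

-- ===== PRECONDITION & SPEC =====
-- Pre_ excludes exactly the inputs where A raises: an unknown view_mode (ValueError)
-- and CHEST_IMAGENOME with chest_imagenome_dicom_ids=None (AssertionError).
def Pre_get_dicom_id_and_orientation_list (views : List (String × String)) (view_mode : String) (chest_imagenome_dicom_ids : Option (List String)) : Prop :=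
  (view_mode = "all" ∨ view_mode = "front_all" ∨ view_mode = "front_single" ∨
   view_mode = "any_single" ∨ view_mode = "chest_imagenome") ∧
  (view_mode = "chest_imagenome" → chest_imagenome_dicom_ids ≠ none)
instance (views : List (String × String)) (view_mode : String) (chest_imagenome_dicom_ids : Option (List String)) : Decidable (Pre_get_dicom_id_and_orientation_list views view_mode chest_imagenome_dicom_ids) := by unfold Pre_get_dicom_id_and_orientation_list; infer_instance

def pvWitness_get_dicom_id_and_orientation_list : (List (String × String)) × String × Option (List String) :=
  ([("d1", "LL"), ("d2", "AP"), ("d3", "PA")], "any_single", none)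

def Spec_get_dicom_id_and_orientation_list (views : List (String × String)) (view_mode : String) (chest_imagenome_dicom_ids : Option (List String)) (out : List (String × String)) : Prop := out = get_dicom_id_and_orientation_list_alt views view_mode chest_imagenome_dicom_ids
instance (views : List (String × String)) (view_mode : String) (chest_imagenome_dicom_ids : Option (List String)) (out : List (String × String)) : Decidable (Spec_get_dicom_id_and_orientation_list views view_mode chest_imagenome_dicom_ids out) := by unfold Spec_get_dicom_id_and_orientation_list; infer_instance

-- ===== CLAIM (what is proved, stated in full; the proofs are below) =====
def Claim_equal_get_dicom_id_and_orientation_list : Prop := ∀ (views : List (String × String)) (view_mode : String) (chest_imagenome_dicom_ids : Option (List String)), Dom_get_dicom_id_and_orientation_list views view_mode chest_imagenome_dicom_ids → Pre_get_dicom_id_and_orientation_list views view_mode chest_imagenome_dicom_ids → Spec_get_dicom_id_and_orientation_list views view_mode chest_imagenome_dicom_ids (get_dicom_id_and_orientation_list views view_mode chest_imagenome_dicom_ids)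

-- ===== LEMMAS AND PROOFS =====

-- B's fold invariant: starting from (pa, ap), the fold yields the accumulators
-- completed with the first "PA"/"AP" matches of the remaining list.
theorem pvB_scan_invariant (l : List (String × String)) (pa ap : Option (String × String)) :
    l.foldl pvB_step (pa, ap)
    = (pa.or (pvA_firstWith "PA" l), ap.or (pvA_firstWith "AP" l)) := by
  induction l generalizing pa ap with
  | nil => simp [pvA_firstWith]
  | cons v rest ih =>
    rw [List.foldl_cons]
    by_cases hPA : v.2 == "PA"
    · have hAP : (v.2 == "AP") = false := by
        simp only [beq_iff_eq] at hPA ⊢; simp [hPA]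
      cases pa with
      | none =>
        have hstep : pvB_step ((none : Option (String × String)), ap) v = (some v, ap) := by
          simp [pvB_step, hPA]
        rw [hstep, ih]
        simp [pvA_firstWith, hPA, hAP, Option.or]
      | some x =>
        have hstep : pvB_step (some x, ap) v = (some x, ap) := by
          simp [pvB_step, hAP]
        rw [hstep, ih]
        simp [pvA_firstWith, hPA, hAP, Option.or]
    · by_cases hAP : v.2 == "AP"
      · cases ap with
        | none =>
          have hstep : pvB_step (pa, (none : Option (String × String))) v = (pa, some v) := by
            simp [pvB_step, hPA, hAP]
          rw [hstep, ih]
          simp [pvA_firstWith, hPA, hAP, Option.or]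
        | some x =>
          have hstep : pvB_step (pa, some x) v = (pa, some x) := by
            simp [pvB_step, hPA, hAP]
          rw [hstep, ih]
          simp [pvA_firstWith, hPA, hAP, Option.or]
      · have hstep : pvB_step (pa, ap) v = (pa, ap) := by
          simp [pvB_step, hPA, hAP]
        rw [hstep, ih]
        simp [pvA_firstWith, hPA, hAP]

theorem pvB_scan_eq (l : List (String × String)) :
    pvB_scan l = (pvA_firstWith "PA" l, pvA_firstWith "AP" l) := by
  unfold pvB_scan
  simpa using pvB_scan_invariant l none none

-- ===== VERDICT (by name: the statement is the Claim_ definition above) =====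
theorem get_dicom_id_and_orientation_list_spec : Claim_equal_get_dicom_id_and_orientation_list := by
  intro views view_mode ids _ hpre
  unfold Spec_get_dicom_id_and_orientation_list
  unfold get_dicom_id_and_orientation_list get_dicom_id_and_orientation_list_alt
  obtain ⟨hmode, hchest⟩ := hpre
  rcases hmode with h | h | h | h | h <;> subst h
  · -- all
    simp only [String.reduceBEq, reduceIte]
    rw [PySem.List.foldl_append_singleton_eq_self, List.nil_append]
  · -- front_all
    simp only [String.reduceBEq, reduceIte]
    rw [PySem.List.foldl_append_if]
    simp
  · -- front_single
    simp only [String.reduceBEq, reduceIte, Bool.false_or, Bool.true_or, pvB_scan_eq]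
    cases hPA : pvA_firstWith "PA" views <;>
      cases hAP : pvA_firstWith "AP" views <;> simp
  · -- any_single
    simp only [String.reduceBEq, reduceIte, Bool.false_or, Bool.or_true, pvB_scan_eq]
    cases hPA : pvA_firstWith "PA" views <;>
      cases hAP : pvA_firstWith "AP" views <;>
        cases views <;> simp_all [List.head?]
  · -- chest_imagenome
    cases ids with
    | none => exact absurd rfl (hchest rfl)
    | some l =>
      simp only [String.reduceBEq, Bool.or_self, Bool.false_eq_true, eq_self_iff_true, if_false, if_true, reduceIte]
      rw [PySem.List.foldl_append_if]
      simp only [List.nil_append, Prod.mk.eta, List.map_id', List.map_id]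
      apply List.filter_congr
      intro v _
      rw [Bool.eq_iff_iff]
      simp [PySem.Set.contains_iff, PySem.Set.mem_ofList, List.contains_iff_mem]
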